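-- pv_equiv track=rewrite | github.com/NoisNette/Codesignal-solutions | largestDistance.py | largestDistance
-- ===== SOURCE A (Python) =====
-- def largestDistance(a):
--     res = -1000
--     for i in range(len(a) // 2):
--         x1 = a[2 * i]
--         y1 = a[2 * i + 1]
--         for j in range(i + 1, len(a) // 2):
--             x2 = a[2 * j]
--             y2 = a[2 * j + 1]
--             dist = max(abs(x1 - x2), abs(y1 - y2))
--             res = max(res, dist)
--     return res
-- ===== SOURCE B (Python) =====
-- def largestDistance(a):
--     n = len(a) // 2
--     if n < 2:
--         return -1000
--     minx = maxx = a[0]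
--     miny = maxy = a[1]
--     for i in range(1, n):
--         x = a[2 * i]
--         y = a[2 * i + 1]
--         minx = min(minx, x)
--         maxx = max(maxx, x)
--         miny = min(miny, y)
--         maxy = max(maxy, y)
--     return max(maxx - minx, maxy - miny)
-- ===== Notes on version B (the rewrite author's own statement) =====
-- stated objective: faster
-- what changed: Replaces the O(n^2) nested loop over all point pairs by a single pass tracking min/max of each coordinate, using the identity max pairwise Chebyshev distance = max(x-range, y-range).
import Mathlib
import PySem

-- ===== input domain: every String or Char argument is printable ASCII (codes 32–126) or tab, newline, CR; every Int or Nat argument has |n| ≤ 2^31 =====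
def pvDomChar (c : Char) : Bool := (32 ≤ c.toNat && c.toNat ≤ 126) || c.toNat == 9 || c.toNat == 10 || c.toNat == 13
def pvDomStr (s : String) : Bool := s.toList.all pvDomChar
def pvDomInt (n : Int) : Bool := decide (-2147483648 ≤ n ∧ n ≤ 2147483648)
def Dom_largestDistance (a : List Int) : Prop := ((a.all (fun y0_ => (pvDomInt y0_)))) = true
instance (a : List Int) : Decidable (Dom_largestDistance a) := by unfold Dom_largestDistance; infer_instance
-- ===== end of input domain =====

-- B replaces A's O(n^2) pairwise Chebyshev scan by a single pass tracking min/max of each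
-- coordinate: the answer equals max(range of x, range of y); -1000 if fewer than 2 points.

-- ===== PORT A =====
-- literal port of A's nested index loops; indices 2*i, 2*i+1 (i < len//2) are always in
-- range, so pyGetD with default 0 is exact here
def largestDistance (a : List Int) : Int :=
  let n : Int := PySem.Int.floordiv (a.length : Int) 2
  (PySem.List.pyRange 0 n 1).foldl (fun res i =>
    let x1 := PySem.List.pyGetD a (2 * i) 0
    let y1 := PySem.List.pyGetD a (2 * i + 1) 0
    (PySem.List.pyRange (i + 1) n 1).foldl (fun res j =>
      let x2 := PySem.List.pyGetD a (2 * j) 0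
      let y2 := PySem.List.pyGetD a (2 * j + 1) 0
      max res (max |x1 - x2| |y1 - y2|)) res) (-1000)

-- ===== PORT B =====
-- literal port of Source B: one pass over the points keeping (minx, maxx, miny, maxy)
def largestDistance_alt (a : List Int) : Int :=
  let n : Int := PySem.Int.floordiv (a.length : Int) 2
  if n < 2 then -1000
  else
    let x0 := PySem.List.pyGetD a 0 0
    let y0 := PySem.List.pyGetD a 1 0
    let st := (PySem.List.pyRange 1 n 1).foldl
      (fun (s : Int × Int × Int × Int) i =>
        let x := PySem.List.pyGetD a (2 * i) 0
        let y := PySem.List.pyGetD a (2 * i + 1) 0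
        (min s.1 x, max s.2.1 x, min s.2.2.1 y, max s.2.2.2 y))
      (x0, x0, y0, y0)
    max (st.2.1 - st.1) (st.2.2.2 - st.2.2.1)

-- ===== PRECONDITION & SPEC =====
def Spec_largestDistance (a : List Int) (out : Int) : Prop := out = largestDistance_alt a
instance (a : List Int) (out : Int) : Decidable (Spec_largestDistance a out) := by unfold Spec_largestDistance; infer_instance

-- ===== CLAIM (what is proved, stated in full; the proofs are below) =====
def Claim_equal_largestDistance : Prop := ∀ (a : List Int), Dom_largestDistance a → Spec_largestDistance a (largestDistance a)

-- ===== LEMMAS AND PROOFS =====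

-- the flat list read as a list of points (pairs), dropping a trailing odd element
def pvToPts : List Int → List (Int × Int)
  | x :: y :: r => (x, y) :: pvToPts r
  | _ => []

theorem pvToPts_length : ∀ (a : List Int), (pvToPts a).length = a.length / 2
  | [] => rfl
  | [_] => by simp [pvToPts]
  | _ :: _ :: r => by
      simp [pvToPts, pvToPts_length r]
      omega

theorem pvGet : ∀ (a : List Int) (k : Nat), k < a.length / 2 →
    a.getD (2 * k) 0 = ((pvToPts a).getD k (0, 0)).1 ∧
    a.getD (2 * k + 1) 0 = ((pvToPts a).getD k (0, 0)).2
  | [], k, h => by simp at h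
  | [_], k, h => by simp at h
  | x :: y :: r, 0, _ => by simp [pvToPts]
  | x :: y :: r, k + 1, h => by
      have ih := pvGet r k (by simp at h; omega)
      have h2 : 2 * (k + 1) = 2 * k + 1 + 1 := by ring
      simpa [pvToPts, h2] using ih

-- the range of point indices, mapped through the flat-list accesses, is a drop of pvToPts
theorem pvMapRange (a : List Int) :
    ∀ (m k : Nat), (pvToPts a).length - k = m →
    (PySem.List.pyRange (k : Int) ((pvToPts a).length : Int) 1).map
        (fun i => (PySem.List.pyGetD a (2 * i) 0, PySem.List.pyGetD a (2 * i + 1) 0))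
      = (pvToPts a).drop k := by
  intro m
  induction m with
  | zero =>
      intro k hk
      rw [PySem.List.pyRange_one_eq_nil (by omega)]
      simp [List.drop_eq_nil_iff]
      omega
  | succ m ih =>
      intro k hk
      have hlt : k < (pvToPts a).length := by omega
      rw [PySem.List.pyRange_one_cons (by exact_mod_cast hlt)]
      have hcast : ((k : Int) + 1) = ((k + 1 : Nat) : Int) := by push_cast; ring
      rw [List.map_cons, hcast, ih (k + 1) (by omega)]
      have hget := pvGet a k (by rw [← pvToPts_length]; exact hlt)
      have h1 : (2 * (k : Int)) = ((2 * k : Nat) : Int) := by push_cast; ring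
      have h2 : (((2 * k : Nat) : Int) + 1) = ((2 * k + 1 : Nat) : Int) := by push_cast; ring
      rw [List.drop_eq_getElem_cons hlt]
      congr 1
      simp only [h1, h2, PySem.List.pyGetD_natCast]
      rw [hget.1, hget.2]
      simp [List.getD_eq_getElem?_getD, hlt]

-- structural forms of the two loops
def pvInner (p : Int × Int) (t : List (Int × Int)) (res : Int) : Int :=
  t.foldl (fun r q => max r (max |p.1 - q.1| |p.2 - q.2|)) res

def pvOuter : List (Int × Int) → Int → Int
  | [], res => res
  | p :: t, res => pvOuter t (pvInner p t res)

def pvScan (t : List (Int × Int)) (s : Int × Int × Int × Int) : Int × Int × Int × Int :=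
  t.foldl (fun s q => (min s.1 q.1, max s.2.1 q.1, min s.2.2.1 q.2, max s.2.2.2 q.2)) s

theorem pvFloordiv (a : List Int) :
    PySem.Int.floordiv (a.length : Int) 2 = ((pvToPts a).length : Int) := by
  rw [pvToPts_length]
  exact_mod_cast PySem.Int.floordiv_natCast a.length 2

-- A's port equals the structural double fold over the points
theorem pvA_eq (a : List Int) : largestDistance a = pvOuter (pvToPts a) (-1000) := by
  unfold largestDistance
  rw [pvFloordiv]
  suffices h : ∀ (m k : Nat) (init : Int), (pvToPts a).length - k = m →
      (PySem.List.pyRange (k : Int) ((pvToPts a).length : Int) 1).foldl (fun res i =>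
        let x1 := PySem.List.pyGetD a (2 * i) 0
        let y1 := PySem.List.pyGetD a (2 * i + 1) 0
        (PySem.List.pyRange (i + 1) ((pvToPts a).length : Int) 1).foldl (fun res j =>
          let x2 := PySem.List.pyGetD a (2 * j) 0
          let y2 := PySem.List.pyGetD a (2 * j + 1) 0
          max res (max |x1 - x2| |y1 - y2|)) res) init
      = pvOuter ((pvToPts a).drop k) init by
    simpa using h (pvToPts a).length 0 (-1000) (by omega)
  intro m
  induction m with
  | zero =>
      intro k init hk
      rw [PySem.List.pyRange_one_eq_nil (by omega)]
      rw [List.drop_eq_nil_iff.mpr (by omega)]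
      rfl
  | succ m ih =>
      intro k init hk
      have hlt : k < (pvToPts a).length := by omega
      rw [PySem.List.pyRange_one_cons (by exact_mod_cast hlt)]
      have hcast : ((k : Int) + 1) = ((k + 1 : Nat) : Int) := by push_cast; ring
      rw [List.foldl_cons, hcast, ih (k + 1) _ (by omega)]
      rw [List.drop_eq_getElem_cons hlt]
      show pvOuter ((pvToPts a).drop (k + 1)) _ = pvOuter ((pvToPts a)[k] :: (pvToPts a).drop (k + 1)) init
      rw [pvOuter]
      congr 1
      have hmap := pvMapRange a ((pvToPts a).length - (k + 1)) (k + 1) rfl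
      rw [← hcast] at hmap
      rw [pvInner, ← hmap, List.foldl_map]
      have hget := pvGet a k (by rw [← pvToPts_length]; exact hlt)
      have h1 : (2 * (k : Int)) = ((2 * k : Nat) : Int) := by push_cast; ring
      have h2 : (((2 * k : Nat) : Int) + 1) = ((2 * k + 1 : Nat) : Int) := by push_cast; ring
      simp only [h1, h2, PySem.List.pyGetD_natCast]
      rw [hget.1, hget.2]
      simp [List.getD_eq_getElem?_getD, hlt]

-- B's port, on ≥ 2 points, equals the structural min/max scan
theorem pvB_eq (a : List Int) (p : Int × Int) (t : List (Int × Int))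
    (hpt : pvToPts a = p :: t) (ht : t ≠ []) :
    largestDistance_alt a =
      (let st := pvScan t (p.1, p.1, p.2, p.2);
       max (st.2.1 - st.1) (st.2.2.2 - st.2.2.1)) := by
  unfold largestDistance_alt
  rw [pvFloordiv, hpt]
  have htlen : 1 ≤ t.length := List.length_pos_iff.mpr ht
  rw [if_neg (by simp; omega)]
  have hx0 := pvGet a 0 (by rw [← pvToPts_length, hpt]; simp)
  rw [hpt] at hx0
  simp only [Nat.mul_zero, Nat.zero_add] at hx0
  have hx : PySem.List.pyGetD a 0 0 = p.1 := by
    have := hx0.1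
    simpa [PySem.List.pyGetD_zero] using this
  have hy : PySem.List.pyGetD a 1 0 = p.2 := by
    have := hx0.2
    have hc : (1 : Int) = ((1 : Nat) : Int) := by norm_num
    rw [hc, PySem.List.pyGetD_natCast]
    simpa using this
  rw [hx, hy]
  have hmap := pvMapRange a ((pvToPts a).length - 1) 1 rfl
  rw [hpt] at hmap
  have h1 : ((1 : Nat) : Int) = (1 : Int) := by norm_num
  rw [h1] at hmap
  have hdrop : (p :: t).drop 1 = t := by simp
  rw [hdrop] at hmap
  generalize hN : (((p :: t).length : Nat) : Int) = N at hmap ⊢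
  conv_rhs => rw [pvScan, ← hmap, List.foldl_map]

-- independent component view of the scan
theorem pvScan_eq : ∀ (t : List (Int × Int)) (c1 c2 c3 c4 : Int),
    pvScan t (c1, c2, c3, c4) =
      (t.foldl (fun m q => min m q.1) c1, t.foldl (fun m q => max m q.1) c2,
       t.foldl (fun m q => min m q.2) c3, t.foldl (fun m q => max m q.2) c4)
  | [], _, _, _, _ => rfl
  | q :: t, c1, c2, c3, c4 => by
      simp only [pvScan, List.foldl_cons]
      exact pvScan_eq t _ _ _ _

-- foldl min / max : bounds and attainment
theorem pvFoldMin_le {α : Type} (f : α → Int) :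
    ∀ (t : List α) (c : Int), t.foldl (fun m q => min m (f q)) c ≤ c ∧
      ∀ q ∈ t, t.foldl (fun m q => min m (f q)) c ≤ f q
  | [], c => ⟨le_refl c, by simp⟩
  | q :: t, c => by
      have ih := pvFoldMin_le f t (min c (f q))
      refine ⟨le_trans ih.1 (min_le_left _ _), ?_⟩
      intro r hr
      rcases List.mem_cons.mp hr with h | h
      · subst h; exact le_trans ih.1 (min_le_right _ _)
      · exact ih.2 r h

theorem pvFoldMax_ge {α : Type} (f : α → Int) :
    ∀ (t : List α) (c : Int), c ≤ t.foldl (fun m q => max m (f q)) c ∧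
      ∀ q ∈ t, f q ≤ t.foldl (fun m q => max m (f q)) c
  | [], c => ⟨le_refl c, by simp⟩
  | q :: t, c => by
      have ih := pvFoldMax_ge f t (max c (f q))
      refine ⟨le_trans (le_max_left _ _) ih.1, ?_⟩
      intro r hr
      rcases List.mem_cons.mp hr with h | h
      · subst h; exact le_trans (le_max_right _ _) ih.1
      · exact ih.2 r h

theorem pvFoldMin_attain {α : Type} (f : α → Int) :
    ∀ (t : List α) (c : Int), t.foldl (fun m q => min m (f q)) c = c ∨
      ∃ q ∈ t, t.foldl (fun m q => min m (f q)) c = f q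
  | [], c => Or.inl rfl
  | q :: t, c => by
      rcases pvFoldMin_attain f t (min c (f q)) with h | ⟨r, hr, h⟩
      · simp only [List.foldl_cons]
        rcases min_choice c (f q) with hm | hm
        · exact Or.inl (by rw [h, hm])
        · exact Or.inr ⟨q, List.mem_cons_self, by rw [h, hm]⟩
      · exact Or.inr ⟨r, List.mem_cons_of_mem _ hr, h⟩

theorem pvFoldMax_attain {α : Type} (f : α → Int) :
    ∀ (t : List α) (c : Int), t.foldl (fun m q => max m (f q)) c = c ∨
      ∃ q ∈ t, t.foldl (fun m q => max m (f q)) c = f q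
  | [], c => Or.inl rfl
  | q :: t, c => by
      rcases pvFoldMax_attain f t (max c (f q)) with h | ⟨r, hr, h⟩
      · simp only [List.foldl_cons]
        rcases max_choice c (f q) with hm | hm
        · exact Or.inl (by rw [h, hm])
        · exact Or.inr ⟨q, List.mem_cons_self, by rw [h, hm]⟩
      · exact Or.inr ⟨r, List.mem_cons_of_mem _ hr, h⟩

-- pvInner properties
theorem pvInner_init_le (p : Int × Int) :
    ∀ (t : List (Int × Int)) (res : Int), res ≤ pvInner p t res
  | [], res => le_refl res
  | q :: t, res =>
      le_trans (le_max_left _ _) (pvInner_init_le p t (max res (max |p.1 - q.1| |p.2 - q.2|)))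

theorem pvInner_ge_mem (p : Int × Int) :
    ∀ (t : List (Int × Int)) (res : Int) (q : Int × Int), q ∈ t →
      max |p.1 - q.1| |p.2 - q.2| ≤ pvInner p t res
  | [], _, _, hq => by simp at hq
  | r :: t, res, q, hq => by
      rcases List.mem_cons.mp hq with h | h
      · subst h
        exact le_trans (le_max_right _ _) (pvInner_init_le p t _)
      · exact pvInner_ge_mem p t _ q h

theorem pvInner_le (p : Int × Int) :
    ∀ (t : List (Int × Int)) (res B : Int), res ≤ B →
      (∀ q ∈ t, max |p.1 - q.1| |p.2 - q.2| ≤ B) → pvInner p t res ≤ B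
  | [], res, B, hres, _ => hres
  | q :: t, res, B, hres, hall =>
      pvInner_le p t _ B (max_le hres (hall q List.mem_cons_self))
        (fun r hr => hall r (List.mem_cons_of_mem _ hr))

theorem pvAbsSubLe {a b lo hi : Int}
    (h1 : lo ≤ a) (h2 : a ≤ hi) (h3 : lo ≤ b) (h4 : b ≤ hi) : |a - b| ≤ hi - lo := by
  rw [abs_le]; omega

-- pvOuter properties
theorem pvOuter_init_le : ∀ (l : List (Int × Int)) (init : Int), init ≤ pvOuter l init
  | [], init => le_refl init
  | p :: t, init => le_trans (pvInner_init_le p t init) (pvOuter_init_le t _)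

theorem pvOuter_nonneg : ∀ (l : List (Int × Int)) (init : Int), 2 ≤ l.length →
    0 ≤ pvOuter l init
  | p :: q :: t, init, _ => by
      have h1 : max |p.1 - q.1| |p.2 - q.2| ≤ pvInner p (q :: t) init :=
        pvInner_ge_mem p (q :: t) init q List.mem_cons_self
      have h0 : (0 : Int) ≤ max |p.1 - q.1| |p.2 - q.2| :=
        le_max_of_le_left (abs_nonneg _)
      calc (0 : Int) ≤ pvInner p (q :: t) init := le_trans h0 h1
        _ ≤ pvOuter (q :: t) (pvInner p (q :: t) init) := pvOuter_init_le _ _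
        _ = pvOuter (p :: q :: t) init := rfl

theorem pvOuter_ge_pair : ∀ (l : List (Int × Int)) (init : Int) (u v : Int × Int),
    u ∈ l → v ∈ l → 2 ≤ l.length → max |u.1 - v.1| |u.2 - v.2| ≤ pvOuter l init
  | [], _, _, _, hu, _, _ => by simp at hu
  | p :: t, init, u, v, hu, hv, hlen => by
      have step : ∀ w ∈ t, max |p.1 - w.1| |p.2 - w.2| ≤ pvOuter (p :: t) init := by
        intro w hw
        exact le_trans (pvInner_ge_mem p t init w hw) (pvOuter_init_le t _)
      rcases List.mem_cons.mp hu with hup | hut <;> rcases List.mem_cons.mp hv with hvp | hvt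
      · have h0 := pvOuter_nonneg (p :: t) init hlen
        rw [hup, hvp]
        simp
        omega
      · subst hup; exact step v hvt
      · rw [hvp, abs_sub_comm u.1 p.1, abs_sub_comm u.2 p.2]
        exact step u hut
      · match t, hut, hvt with
        | q :: t', hut, hvt =>
          by_cases h2 : 2 ≤ (q :: t').length
          · exact le_trans (pvOuter_ge_pair (q :: t') (pvInner p (q :: t') init) u v hut hvt h2)
              (le_refl _)
          · have ht' : t' = [] := by
              cases t' with
              | nil => rfl
              | cons _ _ => simp at h2
            subst ht'
            have hu' : u = q := by simpa using hut
            have hv' : v = q := by simpa using hvt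
            have h0 := pvOuter_nonneg (p :: [q]) init (by simp)
            rw [hu', hv']
            simp
            omega

theorem pvOuter_le : ∀ (l : List (Int × Int)) (init B : Int), init ≤ B →
    (∀ u ∈ l, ∀ v ∈ l, max |u.1 - v.1| |u.2 - v.2| ≤ B) → pvOuter l init ≤ B
  | [], init, B, hinit, _ => hinit
  | p :: t, init, B, hinit, hall => by
      have hin : pvInner p t init ≤ B :=
        pvInner_le p t init B hinit
          (fun q hq => hall p List.mem_cons_self q (List.mem_cons_of_mem _ hq))
      exact pvOuter_le t _ B hin
        (fun u hu v hv => hall u (List.mem_cons_of_mem _ hu) v (List.mem_cons_of_mem _ hv))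

-- the core identity: double fold = max of coordinate ranges
theorem pvMain (p : Int × Int) (t : List (Int × Int)) (ht : t ≠ []) :
    pvOuter (p :: t) (-1000) =
      max (t.foldl (fun m q => max m q.1) p.1 - t.foldl (fun m q => min m q.1) p.1)
          (t.foldl (fun m q => max m q.2) p.2 - t.foldl (fun m q => min m q.2) p.2) := by
  set mnx := t.foldl (fun m q => min m q.1) p.1 with hmnx
  set mxx := t.foldl (fun m q => max m q.1) p.1 with hmxx
  set mny := t.foldl (fun m q => min m q.2) p.2 with hmny
  set mxy := t.foldl (fun m q => max m q.2) p.2 with hmxy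
  have hlen : 2 ≤ (p :: t).length := by
    have : 1 ≤ t.length := List.length_pos_iff.mpr ht
    simp; omega
  have hminb : ∀ w ∈ p :: t, mnx ≤ w.1 ∧ mny ≤ w.2 := by
    intro w hw
    rcases List.mem_cons.mp hw with h | h
    · rw [h]; exact ⟨(pvFoldMin_le Prod.fst t p.1).1, (pvFoldMin_le Prod.snd t p.2).1⟩
    · exact ⟨(pvFoldMin_le Prod.fst t p.1).2 w h, (pvFoldMin_le Prod.snd t p.2).2 w h⟩
  have hmaxb : ∀ w ∈ p :: t, w.1 ≤ mxx ∧ w.2 ≤ mxy := by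
    intro w hw
    rcases List.mem_cons.mp hw with h | h
    · rw [h]; exact ⟨(pvFoldMax_ge Prod.fst t p.1).1, (pvFoldMax_ge Prod.snd t p.2).1⟩
    · exact ⟨(pvFoldMax_ge Prod.fst t p.1).2 w h, (pvFoldMax_ge Prod.snd t p.2).2 w h⟩
  apply le_antisymm
  · -- pvOuter ≤ ranges
    apply pvOuter_le
    · have h1 := (hminb p List.mem_cons_self).1
      have h2 := (hmaxb p List.mem_cons_self).1
      simp; omega
    · intro u hu v hv
      have h1 := hminb u hu; have h2 := hmaxb u hu
      have h3 := hminb v hv; have h4 := hmaxb v hv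
      have hx : |u.1 - v.1| ≤ mxx - mnx := pvAbsSubLe h1.1 h2.1 h3.1 h4.1
      have hy : |u.2 - v.2| ≤ mxy - mny := pvAbsSubLe h1.2 h2.2 h3.2 h4.2
      exact max_le (le_max_of_le_left hx) (le_max_of_le_right hy)
  · -- ranges ≤ pvOuter
    have hattmnx : ∃ u ∈ p :: t, mnx = u.1 := by
      rcases pvFoldMin_attain Prod.fst t p.1 with h | ⟨q, hq, h⟩
      · exact ⟨p, List.mem_cons_self, h⟩
      · exact ⟨q, List.mem_cons_of_mem _ hq, h⟩
    have hattmxx : ∃ u ∈ p :: t, mxx = u.1 := by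
      rcases pvFoldMax_attain Prod.fst t p.1 with h | ⟨q, hq, h⟩
      · exact ⟨p, List.mem_cons_self, h⟩
      · exact ⟨q, List.mem_cons_of_mem _ hq, h⟩
    have hattmny : ∃ u ∈ p :: t, mny = u.2 := by
      rcases pvFoldMin_attain Prod.snd t p.2 with h | ⟨q, hq, h⟩
      · exact ⟨p, List.mem_cons_self, h⟩
      · exact ⟨q, List.mem_cons_of_mem _ hq, h⟩
    have hattmxy : ∃ u ∈ p :: t, mxy = u.2 := by
      rcases pvFoldMax_attain Prod.snd t p.2 with h | ⟨q, hq, h⟩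
      · exact ⟨p, List.mem_cons_self, h⟩
      · exact ⟨q, List.mem_cons_of_mem _ hq, h⟩
    apply max_le
    · obtain ⟨u, hu, hueq⟩ := hattmxx
      obtain ⟨v, hv, hveq⟩ := hattmnx
      have := pvOuter_ge_pair (p :: t) (-1000) u v hu hv hlen
      have habs : mxx - mnx ≤ |u.1 - v.1| := by
        rw [hueq, hveq] at *; exact le_abs_self _
      exact le_trans habs (le_trans (le_max_left _ _) this)
    · obtain ⟨u, hu, hueq⟩ := hattmxy
      obtain ⟨v, hv, hveq⟩ := hattmny
      have := pvOuter_ge_pair (p :: t) (-1000) u v hu hv hlen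
      have habs : mxy - mny ≤ |u.2 - v.2| := by
        rw [hueq, hveq] at *; exact le_abs_self _
      exact le_trans habs (le_trans (le_max_right _ _) this)

-- ===== VERDICT (by name: the statement is the Claim_ definition above) =====
theorem largestDistance_spec : Claim_equal_largestDistance := by
  intro a _
  unfold Spec_largestDistance
  rw [pvA_eq]
  match hpt : pvToPts a with
  | [] =>
      unfold largestDistance_alt
      rw [pvFloordiv, hpt, if_pos (by simp)]
      rfl
  | [p] =>
      unfold largestDistance_alt
      rw [pvFloordiv, hpt, if_pos (by simp)]
      rfl
  | p :: q :: t =>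
      rw [pvB_eq a p (q :: t) hpt (by simp)]
      rw [pvMain p (q :: t) (by simp)]
      simp only [pvScan_eq]
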